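-- pv_equiv track=rewrite | github.com/RadNuke101/OpenAI_Tests | results/39060015/39060015.sl.20240315171853.py | delete_enclosed
-- ===== SOURCE A (Python) =====
-- def delete_enclosed(input_list):
--     output_list = []
--     for item in input_list:
--         new_item = item[0]
--         while '/' in new_item:
--             start_index = new_item.find('/')
--             end_index = new_item.find('/', start_index + 1)
--             if end_index != -1:
--                 new_item = new_item[:start_index] + new_item[end_index + 1:]
--             else:
--                 new_item = new_item[:start_index] + new_item[start_index + 1:]
--         output_list.append(new_item)
--     return output_list
-- ===== SOURCE B (Python) =====
-- def delete_enclosed(input_list):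
--     output_list = []
--     for item in input_list:
--         s = item[0]
--         out = []
--         i = 0
--         n = len(s)
--         while i < n:
--             c = s[i]
--             if c == '/':
--                 j = s.find('/', i + 1)
--                 i = i + 1 if j == -1 else j + 1
--             else:
--                 out.append(c)
--                 i += 1
--         output_list.append(''.join(out))
--     return output_list
-- ===== Notes on version B (the rewrite author's own statement) =====
-- stated objective: alternative
-- what changed: A repeatedly re-scans the shrinking string with find() and rebuilds it by slicing out one slash-span per iteration; B makes a single left-to-right pass per string, jumping from each opening slash directly past its closing slash and collecting kept characters once.
import Mathlib
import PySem

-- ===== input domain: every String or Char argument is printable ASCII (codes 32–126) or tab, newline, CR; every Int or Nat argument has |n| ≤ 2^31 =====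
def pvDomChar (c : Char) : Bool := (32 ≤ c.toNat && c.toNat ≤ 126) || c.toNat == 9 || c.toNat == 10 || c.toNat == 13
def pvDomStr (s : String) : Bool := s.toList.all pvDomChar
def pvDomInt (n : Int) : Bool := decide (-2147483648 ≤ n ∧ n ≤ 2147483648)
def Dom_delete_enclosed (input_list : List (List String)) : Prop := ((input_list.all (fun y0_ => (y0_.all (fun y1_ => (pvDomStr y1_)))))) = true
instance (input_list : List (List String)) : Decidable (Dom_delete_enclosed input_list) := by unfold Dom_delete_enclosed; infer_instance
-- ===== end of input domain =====

-- B replaces A's repeated find-and-splice loop by a single left-to-right scan that skips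
-- from each opening slash past its closing slash; objective: alternative algorithm.


-- ===== PORT A =====
-- A's while-loop: as long as '/' occurs, splice out the first '/…/' span (or a lone final '/').
-- fuel makes the same computation total; each iteration removes at least one character,
-- so fuel = s.length always suffices.
def procA : Nat → List Char → List Char
  | 0, s => s
  | f + 1, s =>
    if PySem.Chars.isIn ['/'] s then
      let start_index := PySem.Chars.find s ['/']
      let end_index := PySem.Chars.findFrom s ['/'] (start_index + 1) none
      if end_index ≠ -1 then
        procA f (PySem.List.slice s none (some start_index) ++
                 PySem.List.slice s (some (end_index + 1)) none)
      else
        procA f (PySem.List.slice s none (some start_index) ++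
                 PySem.List.slice s (some (start_index + 1)) none)
    else s

def delete_enclosed (input_list : List (List String)) : List String :=
  input_list.foldl (fun output_list item =>
    match PySem.List.pyGet? item 0 with  -- item[0]; none = IndexError, excluded by Pre_
    | none => output_list
    | some s => output_list ++ [String.ofList (procA s.toList.length s.toList)]) []

-- ===== PORT B =====
-- B's while-loop over the index i, transcribed as recursion on the remaining suffix:
-- a non-slash char is kept; at a slash, jump past the next slash (or just past this one).
def scanB (s : List Char) : List Char :=
  match s with
  | [] => []
  | c :: rest =>
    if c = '/' then
      let j := PySem.Chars.find rest ['/']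
      if j = -1 then scanB rest
      else scanB (rest.drop (j.toNat + 1))
    else c :: scanB rest
  termination_by s.length
  decreasing_by
    all_goals simp

def delete_enclosed_alt (input_list : List (List String)) : List String :=
  input_list.foldl (fun output_list item =>
    match PySem.List.pyGet? item 0 with
    | none => output_list
    | some s => output_list ++ [String.ofList (scanB s.toList)]) []

-- ===== PRECONDITION & SPEC =====
-- A evaluates item[0]; an empty inner list makes it raise IndexError, so Pre_ excludes it.
def Pre_delete_enclosed (input_list : List (List String)) : Prop :=
  ∀ item ∈ input_list, item ≠ []
instance (input_list : List (List String)) : Decidable (Pre_delete_enclosed input_list) := by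
  unfold Pre_delete_enclosed; infer_instance

def pvWitness_delete_enclosed : List (List String) := [["a/bc/d/e"], ["x//y", "zz"]]

def Spec_delete_enclosed (input_list : List (List String)) (out : List String) : Prop := out = delete_enclosed_alt input_list
instance (input_list : List (List String)) (out : List String) : Decidable (Spec_delete_enclosed input_list out) := by unfold Spec_delete_enclosed; infer_instance

-- ===== CLAIM (what is proved, stated in full; the proofs are below) =====
def Claim_equal_delete_enclosed : Prop := ∀ (input_list : List (List String)), Dom_delete_enclosed input_list → Pre_delete_enclosed input_list → Spec_delete_enclosed input_list (delete_enclosed input_list)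

-- ===== LEMMAS AND PROOFS =====

-- a singleton ['/'] is a prefix of s.drop k iff s has '/' at position k
theorem slash_prefix_drop_iff (s : List Char) (k : Nat) :
    (['/'] <+: s.drop k) ↔ s[k]? = some '/' := by
  constructor
  · rintro ⟨t, ht⟩
    have : (s.drop k)[0]? = some '/' := by rw [← ht]; simp
    simpa using this
  · intro h
    refine ⟨(s.drop k).tail, ?_⟩
    have h0 : (s.drop k)[0]? = some '/' := by simpa using h
    cases hd : s.drop k with
    | nil => simp [hd] at h0
    | cons x xs => simp [hd] at h0 ⊢; simp [h0]

theorem scanB_no_slash (s : List Char) (h : '/' ∉ s) : scanB s = s := by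
  induction s with
  | nil => rw [scanB]
  | cons c rest ih =>
    rw [scanB]
    have hc : ¬ c = '/' := by intro hc; exact h (by simp [hc])
    simp only [if_neg hc]
    rw [ih (by intro hm; exact h (by simp [hm]))]

theorem scanB_append (a t : List Char) (h : '/' ∉ a) :
    scanB (a ++ t) = a ++ scanB t := by
  induction a with
  | nil => simp
  | cons c rest ih =>
    have hc : ¬ c = '/' := by intro hc; exact h (by simp [hc])
    rw [List.cons_append, scanB]
    simp only [if_neg hc]
    rw [ih (by intro hm; exact h (by simp [hm]))]; simp

-- the first '/' of a decomposed list sits right after the slash-free prefix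
theorem find_slash_decomp (a b : List Char) (h : '/' ∉ a) :
    PySem.Chars.find (a ++ '/' :: b) ['/'] = (a.length : Int) := by
  set s := a ++ '/' :: b with hs
  have hinf : ['/'] <:+: s := ⟨a, b, by simp [hs]⟩
  have hpos : 0 ≤ PySem.Chars.find s ['/'] := (PySem.Chars.find_nonneg_iff ..).mpr hinf
  obtain ⟨hpre, hmin⟩ := PySem.Chars.find_spec (s := s) (sub := ['/']) hpos
  have hat : s[(PySem.Chars.find s ['/']).toNat]? = some '/' :=
    (slash_prefix_drop_iff ..).mp hpre
  have hlen : s[a.length]? = some '/' := by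
    rw [hs]; rw [List.getElem?_append_right (le_refl _)]; simp
  -- find ≤ a.length
  have h1 : (PySem.Chars.find s ['/']).toNat ≤ a.length := by
    by_contra hgt
    exact (hmin a.length (by omega)) ((slash_prefix_drop_iff ..).mpr hlen)
  -- a.length ≤ find: position find.toNat holds '/', but a has none
  have h2 : a.length ≤ (PySem.Chars.find s ['/']).toNat := by
    by_contra hlt
    have hidx : (PySem.Chars.find s ['/']).toNat < a.length := by omega
    have : s[(PySem.Chars.find s ['/']).toNat]? = a[(PySem.Chars.find s ['/']).toNat]? := by
      rw [hs, List.getElem?_append_left hidx]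
    rw [this] at hat
    exact h (List.mem_of_getElem? hat)
  have h3 : (PySem.Chars.find s ['/']).toNat = a.length := le_antisymm h1 h2
  omega

theorem exists_first_slash (s : List Char) (h : '/' ∈ s) :
    ∃ a b, s = a ++ '/' :: b ∧ '/' ∉ a := by
  set p : Char → Bool := (fun c => decide (c ≠ '/')) with hp
  have hsplit := List.takeWhile_append_dropWhile (p := p) (l := s)
  have hne : s.dropWhile p ≠ [] := by
    intro hnil
    rw [← hsplit, hnil, List.append_nil] at h
    have := List.mem_takeWhile_imp h
    simp [hp] at this
  have hheadc : (s.dropWhile p).head hne = '/' := by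
    simpa [hp] using List.head_dropWhile_not p hne
  have hcons : s.dropWhile p = '/' :: (s.dropWhile p).tail := by
    rw [← hheadc]; exact (List.cons_head_tail hne).symm
  refine ⟨s.takeWhile p, (s.dropWhile p).tail, ?_, ?_⟩
  · conv_lhs => rw [← hsplit, hcons]
  · intro hmem
    have := List.mem_takeWhile_imp hmem
    simp [hp] at this

theorem drop_len_succ (a : List Char) (x : Char) (t : List Char) :
    (a ++ x :: t).drop (a.length + 1) = t := by
  induction a with
  | nil => simp
  | cons y ys ih => simp [ih]

-- A's splice loop, run with enough fuel, equals B's single scan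
theorem count_le_fuel_main (f : Nat) : ∀ s : List Char, s.count '/' ≤ f → procA f s = scanB s := by
  induction f with
  | zero =>
    intro s h
    have hns : '/' ∉ s := by
      rw [← List.count_eq_zero]; omega
    rw [procA, scanB_no_slash s hns]
  | succ f ih =>
    intro s h
    rw [procA]
    by_cases hin : PySem.Chars.isIn ['/'] s = true
    · have hmem : '/' ∈ s := by
        have := (PySem.Chars.isIn_iff_infix ..).mp hin
        exact (List.singleton_infix_iff ..).mp this
      obtain ⟨a, b, rfl, hna⟩ := exists_first_slash s hmem
      have hfind : PySem.Chars.find (a ++ '/' :: b) ['/'] = (a.length : Int) :=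
        find_slash_decomp a b hna
      have hk : a.length + 1 ≤ (a ++ '/' :: b).length := by simp
      have hcast : ((a.length : Int) + 1) = ((a.length + 1 : Nat) : Int) := by push_cast; ring
      have hdrop : (a ++ '/' :: b).drop (a.length + 1) = b := drop_len_succ a '/' b
      have hff := PySem.Chars.findFrom_natCast (a ++ '/' :: b) ['/'] (a.length + 1) hk
      rw [hdrop] at hff
      simp only [hin, if_true, hfind, hcast, hff]
      by_cases hb : PySem.Chars.find b ['/'] = -1
      · -- no closing slash: only the slash is removed
        have hnb : '/' ∉ b := by
          intro hm
          exact (PySem.Chars.find_ne_neg_one_iff b ['/']).mpr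
            ((List.singleton_infix_iff ..).mpr hm) hb
        simp only [hb, if_true, ne_eq, not_true_eq_false, if_false]
        rw [PySem.List.slice_to _ (by positivity), PySem.List.slice_from _ (by push_cast; omega)]
        have htake : ((a.length : Int)).toNat = a.length := by omega
        have htake2 : (((a.length + 1 : Nat) : Int)).toNat = a.length + 1 := by omega
        rw [htake, htake2, List.take_left, hdrop]
        rw [ih (a ++ b) (by simp [List.count_append, List.count_eq_zero.mpr hna, List.count_eq_zero.mpr hnb])]
        rw [scanB_append _ _ hna, scanB_append _ _ hna, scanB]
        simp only [hb, if_true]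
      · -- closing slash exists: the span is removed
        have hposb : 0 ≤ PySem.Chars.find b ['/'] := by
          have := PySem.Chars.neg_one_le_find (s := b) (sub := ['/'])
          omega
        have hmemb : '/' ∈ b := by
          have := (PySem.Chars.find_ne_neg_one_iff b ['/']).mp hb
          exact (List.singleton_infix_iff ..).mp this
        obtain ⟨c, d, rfl, hnc⟩ := exists_first_slash b hmemb
        have hfb : PySem.Chars.find (c ++ '/' :: d) ['/'] = (c.length : Int) :=
          find_slash_decomp c d hnc
        have hne2 : ¬ ((a.length + 1 : Nat) : Int) + PySem.Chars.find (c ++ '/' :: d) ['/'] = -1 := by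
          rw [hfb]; push_cast; omega
        rw [if_neg hb, if_pos hne2, hfb]
        rw [PySem.List.slice_to _ (by positivity), PySem.List.slice_from _ (by push_cast; omega)]
        have htake : ((a.length : Int)).toNat = a.length := by omega
        have htake3 : (((a.length + 1 : Nat) : Int) + (c.length : Int) + 1).toNat
            = a.length + 1 + (c.length + 1) := by omega
        rw [htake, htake3, List.take_left]
        have hdrop2 : (a ++ '/' :: (c ++ '/' :: d)).drop (a.length + 1 + (c.length + 1)) = d := by
          have e1 : a ++ '/' :: (c ++ '/' :: d) = (a ++ '/' :: c) ++ '/' :: d := by simp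
          have e2 : a.length + 1 + (c.length + 1) = (a ++ '/' :: c).length + 1 := by
            simp only [List.length_append, List.length_cons]; omega
          rw [e1, e2]
          exact drop_len_succ (a ++ '/' :: c) '/' d
        rw [hdrop2]
        have hcount : (a ++ d).count '/' ≤ f := by
          have hs : (a ++ '/' :: (c ++ '/' :: d)).count '/' =
              d.count '/' + 2 := by
            simp [List.count_append, List.count_eq_zero.mpr hna,
              List.count_eq_zero.mpr hnc]
          rw [List.count_append, List.count_eq_zero.mpr hna]
          omega
        rw [ih (a ++ d) hcount, scanB_append _ _ hna, scanB_append _ _ hna, scanB]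
        simp only [hfb]
        have hjne : ¬ ((c.length : Int) = -1) := by omega
        simp only [hjne, if_false]
        have : ((c.length : Int)).toNat + 1 = c.length + 1 := by omega
        rw [this]
        simp only [if_true]
        rw [drop_len_succ c '/' d]
    · have hns : '/' ∉ s := by
        intro hm
        rw [PySem.Chars.isIn_iff_infix] at hin
        exact hin ((List.singleton_infix_iff ..).mpr hm)
      rw [if_neg hin, scanB_no_slash s hns]

theorem procA_eq_scanB (s : List Char) : procA s.length s = scanB s :=
  count_le_fuel_main s.length s List.count_le_length

-- ===== VERDICT (by name: the statement is the Claim_ definition above) =====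
theorem delete_enclosed_spec : Claim_equal_delete_enclosed := by
  intro input_list _ _
  unfold Spec_delete_enclosed delete_enclosed delete_enclosed_alt
  have hf : (fun (output_list : List String) (item : List String) =>
      match PySem.List.pyGet? item 0 with
      | none => output_list
      | some s => output_list ++ [String.ofList (procA s.toList.length s.toList)]) =
      (fun (output_list : List String) (item : List String) =>
      match PySem.List.pyGet? item 0 with
      | none => output_list
      | some s => output_list ++ [String.ofList (scanB s.toList)]) := by
    funext output_list item
    cases h : PySem.List.pyGet? item 0 with
    | none => rfl
    | some s => simp only [procA_eq_scanB]
  rw [hf]
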